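-- pv_equiv track=rewrite | github.com/needitem/pixllm | backend/app/services/conversations/history.py | merge_conversation_messages
-- ===== SOURCE A (Python) =====
-- from typing import Dict, List, Tuple
--
-- def _message_signature(message: Dict[str, str]) -> Tuple[str, str]:
--     return (
--         str((message or {}).get("role") or "").strip().lower(),
--         str((message or {}).get("content") or ""),
--     )
--
-- def merge_conversation_messages(
--     stored_messages: List[Dict[str, str]],
--     request_messages: List[Dict[str, str]],
-- ) -> List[Dict[str, str]]:
--     if not stored_messages:
--         return list(request_messages or [])
--     if not request_messages:
--         return list(stored_messages or [])
--
--     stored = list(stored_messages or [])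
--     incoming = list(request_messages or [])
--     max_overlap = min(len(stored), len(incoming))
--     overlap = 0
--     for size in range(max_overlap, 0, -1):
--         if [_message_signature(item) for item in stored[-size:]] == [
--             _message_signature(item) for item in incoming[:size]
--         ]:
--             overlap = size
--             break
--     return [*stored, *incoming[overlap:]]
-- ===== SOURCE B (Python) =====
-- from typing import Dict, List, Tuple
--
-- _MOD = (1 << 61) - 1
-- _BASE = 1000003
--
-- def _signature(message: Dict[str, str]) -> Tuple[str, str]:
--     return (
--         str((message or {}).get("role") or "").strip().lower(),
--         str((message or {}).get("content") or ""),
--     )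
--
-- def _sig_hash(sig: Tuple[str, str]) -> int:
--     role, content = sig
--     acc = 1
--     for ch in role:
--         acc = (acc * _BASE + ord(ch) + 1) % _MOD
--     acc = (acc * _BASE + 2) % _MOD  # field separator
--     for ch in content:
--         acc = (acc * _BASE + ord(ch) + 1) % _MOD
--     return acc
--
-- def _prefix_hashes(vals: List[int]) -> List[int]:
--     # hs[k] = Horner hash of vals[:k] modulo _MOD
--     hs = [0]
--     acc = 0
--     for v in vals:
--         acc = (acc * _BASE + v) % _MOD
--         hs.append(acc)
--     return hs
--
-- def _suffix_hashes(vals: List[int]) -> List[int]: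
--     # hs[k] = Horner hash of vals[len(vals)-k:] modulo _MOD
--     hs = [0]
--     acc = 0
--     p = 1
--     for v in reversed(vals):
--         acc = (v * p + acc) % _MOD
--         p = (p * _BASE) % _MOD
--         hs.append(acc)
--     return hs
--
-- def merge_conversation_messages(
--     stored_messages: List[Dict[str, str]],
--     request_messages: List[Dict[str, str]],
-- ) -> List[Dict[str, str]]:
--     if not stored_messages or not request_messages:
--         return list(stored_messages or []) + list(request_messages or [])
--
--     n = len(stored_messages)
--     s_sigs = [_signature(m) for m in stored_messages]
--     i_sigs = [_signature(m) for m in request_messages]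
--     max_overlap = min(n, len(request_messages))
--     # Rabin-Karp: one integer comparison per candidate size, exact verification on a hash hit
--     f = _prefix_hashes([_sig_hash(s) for s in i_sigs[:max_overlap]])
--     g = _suffix_hashes([_sig_hash(s) for s in s_sigs[n - max_overlap:]])
--     overlap = 0
--     for size in range(max_overlap, 0, -1):
--         if f[size] == g[size] and i_sigs[:size] == s_sigs[n - size:]:
--             overlap = size
--             break
--     return [*stored_messages, *request_messages[overlap:]]
-- ===== Notes on version B (the rewrite author's own statement) =====
-- stated objective: alternative
-- what changed: A recomputes and compares whole signature slice lists for every candidate overlap size; B is Rabin-Karp: it hashes each signature once, builds prefix/suffix rolling-hash tables in one pass, compares one pair of integers per candidate size and verifies the actual slices only on a hash hit.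
import Mathlib
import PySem

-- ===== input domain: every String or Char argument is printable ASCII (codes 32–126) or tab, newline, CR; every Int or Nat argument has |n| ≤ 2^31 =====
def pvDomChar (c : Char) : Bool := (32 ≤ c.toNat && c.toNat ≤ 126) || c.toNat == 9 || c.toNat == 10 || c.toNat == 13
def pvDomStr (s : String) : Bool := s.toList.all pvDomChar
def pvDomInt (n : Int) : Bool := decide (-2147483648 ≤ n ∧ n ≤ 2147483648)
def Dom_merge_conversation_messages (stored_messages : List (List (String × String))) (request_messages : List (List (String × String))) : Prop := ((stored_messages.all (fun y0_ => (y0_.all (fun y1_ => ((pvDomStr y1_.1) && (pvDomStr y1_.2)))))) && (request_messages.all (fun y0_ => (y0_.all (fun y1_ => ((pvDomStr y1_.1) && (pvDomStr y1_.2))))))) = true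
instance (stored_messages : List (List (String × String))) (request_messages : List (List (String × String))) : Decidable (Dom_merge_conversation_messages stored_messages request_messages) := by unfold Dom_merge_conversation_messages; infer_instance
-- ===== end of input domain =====

-- B replaces A's repeated slice-list comparisons by Rabin-Karp rolling hashes
-- (signatures hashed once, one integer comparison per candidate size, exact
-- verification on a hash hit); objective: alternative algorithm, identical values.

-- ===== PORT A =====
-- _message_signature: (str((m or {}).get("role") or "").strip().lower(), str((m or {}).get("content") or ""))
-- dict.get = first match in the association list; `x or ""` on str/None is `getD ""`.
def pvSignature (message : List (String × String)) : String × String :=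
  (PySem.Str.lower (PySem.Str.strip (((message.find? (fun p => p.1 == "role")).map (·.2)).getD "")),
   ((message.find? (fun p => p.1 == "content")).map (·.2)).getD "")

-- `for size in range(max_overlap, 0, -1): if …: overlap = size; break` (descending, first hit wins)
def pvFindOverlapA (stored incoming : List (List (String × String))) : Nat → Nat
  | 0 => 0
  | (size + 1) =>
      if (PySem.List.slice stored (some (-((size + 1 : Nat) : Int))) none).map pvSignature
           = (PySem.List.slice incoming none (some ((size + 1 : Nat) : Int))).map pvSignature
      then size + 1
      else pvFindOverlapA stored incoming size

def merge_conversation_messages (stored_messages : List (List (String × String))) (request_messages : List (List (String × String))) : List (List (String × String)) :=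
  if stored_messages = [] then request_messages
  else if request_messages = [] then stored_messages
  else
    let stored := stored_messages
    let incoming := request_messages
    let max_overlap := min stored.length incoming.length
    let overlap := pvFindOverlapA stored incoming max_overlap
    stored ++ PySem.List.slice incoming (some (overlap : Int)) none

-- ===== PORT B =====
def pvMOD : Nat := 2305843009213693951   -- (1 << 61) - 1
def pvBASE : Nat := 1000003

-- _sig_hash: Horner hash of role, a field separator, then content (all mod pvMOD)
def pvSigHash (sig : String × String) : Nat :=
  let acc := sig.1.toList.foldl (fun a c => (a * pvBASE + c.toNat + 1) % pvMOD) 1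
  let acc := (acc * pvBASE + 2) % pvMOD
  sig.2.toList.foldl (fun a c => (a * pvBASE + c.toNat + 1) % pvMOD) acc

-- _prefix_hashes: state = (hs list built by append, current acc)
def pvPrefStep (st : List Nat × Nat) (v : Nat) : List Nat × Nat :=
  let acc := (st.2 * pvBASE + v) % pvMOD
  (st.1 ++ [acc], acc)
def pvPrefixHashes (vals : List Nat) : List Nat := (vals.foldl pvPrefStep ([0], 0)).1

-- _suffix_hashes: iterates reversed(vals); state = (hs, acc, p)
def pvSuffStep (st : List Nat × Nat × Nat) (v : Nat) : List Nat × Nat × Nat :=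
  let acc := (v * st.2.2 + st.2.1) % pvMOD
  (st.1 ++ [acc], acc, (st.2.2 * pvBASE) % pvMOD)
def pvSuffixHashes (vals : List Nat) : List Nat := (vals.reverse.foldl pvSuffStep ([0], 0, 1)).1

-- B's loop: `for size in range(max_overlap, 0, -1): if f[size]==g[size] and slices equal: overlap=size; break`
-- f[size]/g[size] are in-range list indexings, ported as getD; the slices have
-- nonnegative in-range bounds, ported as drop/take (exact there).
def pvFindOverlapB (s_sigs i_sigs : List (String × String)) (f g : List Nat) (n : Nat) : Nat → Nat
  | 0 => 0
  | (size + 1) =>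
      if f.getD (size + 1) 0 = g.getD (size + 1) 0 ∧
         i_sigs.take (size + 1) = s_sigs.drop (n - (size + 1))
      then size + 1
      else pvFindOverlapB s_sigs i_sigs f g n size

def merge_conversation_messages_alt (stored_messages : List (List (String × String))) (request_messages : List (List (String × String))) : List (List (String × String)) :=
  if stored_messages = [] ∨ request_messages = [] then stored_messages ++ request_messages
  else
    let n := stored_messages.length
    let s_sigs := stored_messages.map pvSignature
    let i_sigs := request_messages.map pvSignature
    let max_overlap := min n request_messages.length
    let f := pvPrefixHashes ((i_sigs.take max_overlap).map pvSigHash)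
    let g := pvSuffixHashes (((s_sigs.drop (n - max_overlap)).map pvSigHash))
    let overlap := pvFindOverlapB s_sigs i_sigs f g n max_overlap
    stored_messages ++ request_messages.drop overlap

-- ===== PRECONDITION & SPEC =====
def Spec_merge_conversation_messages (stored_messages : List (List (String × String))) (request_messages : List (List (String × String))) (out : List (List (String × String))) : Prop := out = merge_conversation_messages_alt stored_messages request_messages
instance (stored_messages : List (List (String × String))) (request_messages : List (List (String × String))) (out : List (List (String × String))) : Decidable (Spec_merge_conversation_messages stored_messages request_messages out) := by unfold Spec_merge_conversation_messages; infer_instance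

-- ===== CLAIM (what is proved, stated in full; the proofs are below) =====
def Claim_equal_merge_conversation_messages : Prop := ∀ (stored_messages : List (List (String × String))) (request_messages : List (List (String × String))), Dom_merge_conversation_messages stored_messages request_messages → Spec_merge_conversation_messages stored_messages request_messages (merge_conversation_messages stored_messages request_messages)

-- ===== LEMMAS AND PROOFS =====

-- plain (unreduced) Horner value of a list of hash values
def pvHorner (l : List Nat) : Nat := l.foldl (fun a v => a * pvBASE + v) 0

theorem pvHornerFold (l : List Nat) : ∀ a : Nat,
    l.foldl (fun a v => a * pvBASE + v) a = a * pvBASE ^ l.length + pvHorner l := by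
  induction l with
  | nil => intro a; simp [pvHorner]
  | cons v t ih =>
      intro a
      simp only [List.foldl, List.length_cons, pvHorner]
      rw [ih (a * pvBASE + v), show 0 * pvBASE + v = v from by ring, ih v]
      ring

theorem pvHornerAppend (l : List Nat) (v : Nat) :
    pvHorner (l ++ [v]) = pvHorner l * pvBASE + v := by
  simp [pvHorner, List.foldl_append]

theorem pvHornerCons (v : Nat) (l : List Nat) :
    pvHorner (v :: l) = v * pvBASE ^ l.length + pvHorner l := by
  have : pvHorner (v :: l) = l.foldl (fun a v => a * pvBASE + v) v := by
    simp [pvHorner]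
  rw [this, pvHornerFold]

theorem pvModMod (a : Nat) : a % pvMOD % pvMOD = a % pvMOD :=
  Nat.mod_mod_of_dvd a dvd_rfl

theorem pvMixmod (a v : Nat) : ((a % pvMOD) * pvBASE + v) % pvMOD = (a * pvBASE + v) % pvMOD := by
  conv_lhs => rw [Nat.add_mod, Nat.mul_mod, pvModMod]
  conv_rhs => rw [Nat.add_mod, Nat.mul_mod]

theorem pvMixmod2 (v p h : Nat) : (v * (p % pvMOD) + h % pvMOD) % pvMOD = (v * p + h) % pvMOD := by
  conv_lhs => rw [Nat.add_mod, Nat.mul_mod, pvModMod, pvModMod]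
  conv_rhs => rw [Nat.add_mod, Nat.mul_mod]

theorem pvPref_inv (vals : List Nat) :
    vals.foldl pvPrefStep ([0], 0) =
      ((List.range (vals.length + 1)).map (fun k => pvHorner (vals.take k) % pvMOD),
       pvHorner vals % pvMOD) := by
  induction vals using List.reverseRecOn with
  | nil => simp [pvHorner, List.range_succ]
  | append_singleton l v ih =>
      rw [List.foldl_append, ih]
      simp only [List.foldl, pvPrefStep]
      have hacc : (pvHorner l % pvMOD * pvBASE + v) % pvMOD = pvHorner (l ++ [v]) % pvMOD := by
        rw [pvMixmod, pvHornerAppend]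
      rw [hacc]
      congr 1
      · rw [List.length_append, List.length_singleton]
        conv_rhs => rw [show l.length + 1 + 1 = (l.length + 1) + 1 from rfl, List.range_succ, List.map_append]
        congr 1
        · apply List.map_congr_left
          intro k hk
          have hk' : k ≤ l.length := by
            have := List.mem_range.1 hk; omega
          rw [List.take_append_of_le_length hk']
        · simp [List.take_of_length_le]

theorem pvSuff_inv (w : List Nat) :
    w.foldl pvSuffStep ([0], 0, 1) =
      ((List.range (w.length + 1)).map (fun k => pvHorner (w.take k).reverse % pvMOD),
       pvHorner w.reverse % pvMOD, pvBASE ^ w.length % pvMOD) := by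
  induction w using List.reverseRecOn with
  | nil =>
      simp [pvHorner, List.range_succ]
      decide
  | append_singleton l v ih =>
      rw [List.foldl_append, ih]
      simp only [List.foldl, pvSuffStep]
      have hacc : (v * (pvBASE ^ l.length % pvMOD) + pvHorner l.reverse % pvMOD) % pvMOD
          = pvHorner (l ++ [v]).reverse % pvMOD := by
        rw [pvMixmod2, List.reverse_append, List.reverse_singleton, List.singleton_append,
            pvHornerCons, List.length_reverse]
      have hp : (pvBASE ^ l.length % pvMOD) * pvBASE % pvMOD = pvBASE ^ (l ++ [v]).length % pvMOD := by
        have := pvMixmod (pvBASE ^ l.length) 0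
        simp only [Nat.add_zero] at this
        rw [this, List.length_append, List.length_singleton, pow_succ]
      rw [hacc, hp]
      congr 1
      rw [List.length_append, List.length_singleton]
      conv_rhs => rw [show l.length + 1 + 1 = (l.length + 1) + 1 from rfl, List.range_succ, List.map_append]
      congr 1
      · apply List.map_congr_left
        intro k hk
        have hk' : k ≤ l.length := by
          have := List.mem_range.1 hk; omega
        rw [List.take_append_of_le_length hk']
      · simp [List.take_of_length_le]

theorem pvPrefixHashes_getD (vals : List Nat) (k : Nat) (hk : k ≤ vals.length) :
    (pvPrefixHashes vals).getD k 0 = pvHorner (vals.take k) % pvMOD := by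
  rw [pvPrefixHashes, pvPref_inv]
  simp only [List.getD, List.getElem?_map, List.getElem?_range (by omega : k < vals.length + 1),
    Option.map_some, Option.getD_some]

theorem pvSuffixHashes_getD (vals : List Nat) (k : Nat) (hk : k ≤ vals.length) :
    (pvSuffixHashes vals).getD k 0 = pvHorner (vals.drop (vals.length - k)) % pvMOD := by
  rw [pvSuffixHashes, pvSuff_inv]
  have hk' : k < vals.reverse.length + 1 := by simp; omega
  simp only [List.getD, List.getElem?_map, List.getElem?_range hk',
    Option.map_some, Option.getD_some]
  have h2 : (vals.reverse.take k).reverse = vals.drop (vals.length - k) := by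
    rw [List.take_reverse, List.reverse_reverse]
  rw [h2]

-- signature-slice equality forces the two rolling hashes to agree
theorem pvHashEq (s_sigs i_sigs : List (String × String)) (Mo j : Nat)
    (hM1 : Mo ≤ s_sigs.length) (hM2 : Mo ≤ i_sigs.length) (hj : j ≤ Mo)
    (h : s_sigs.drop (s_sigs.length - j) = i_sigs.take j) :
    (pvPrefixHashes ((i_sigs.take Mo).map pvSigHash)).getD j 0
      = (pvSuffixHashes ((s_sigs.drop (s_sigs.length - Mo)).map pvSigHash)).getD j 0 := by
  have hlen1 : ((i_sigs.take Mo).map pvSigHash).length = Mo := by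
    simp [List.length_take]; omega
  have hlen2 : ((s_sigs.drop (s_sigs.length - Mo)).map pvSigHash).length = Mo := by
    simp [List.length_drop]; omega
  rw [pvPrefixHashes_getD _ j (by omega), pvSuffixHashes_getD _ j (by omega), hlen2]
  congr 2
  rw [← List.map_take, ← List.map_drop, List.take_take, min_eq_left hj,
      List.drop_drop, ← h]
  congr 2
  omega

theorem pvFind_eq (stored incoming : List (List (String × String))) :
    ∀ k, k ≤ min stored.length incoming.length →
    pvFindOverlapA stored incoming k
      = pvFindOverlapB (stored.map pvSignature) (incoming.map pvSignature)
          (pvPrefixHashes (((incoming.map pvSignature).take (min stored.length incoming.length)).map pvSigHash))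
          (pvSuffixHashes ((((stored.map pvSignature).drop (stored.length - min stored.length incoming.length)).map pvSigHash)))
          stored.length k := by
  intro k
  induction k with
  | zero => intro _; rfl
  | succ size ih =>
      intro hk
      have hcondA : ((PySem.List.slice stored (some (-((size + 1 : Nat) : Int))) none).map pvSignature
           = (PySem.List.slice incoming none (some ((size + 1 : Nat) : Int))).map pvSignature)
          ↔ ((stored.map pvSignature).drop (stored.length - (size + 1))
               = (incoming.map pvSignature).take (size + 1)) := by
        rw [PySem.List.slice_from_neg_natCast _ _ (by omega), PySem.List.slice_to_natCast,
            List.map_drop, List.map_take]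
      have hsl : (stored.map pvSignature).length = stored.length := by simp
      rw [pvFindOverlapA, pvFindOverlapB]
      by_cases hc : (stored.map pvSignature).drop (stored.length - (size + 1))
          = (incoming.map pvSignature).take (size + 1)
      · have hhash := pvHashEq (stored.map pvSignature) (incoming.map pvSignature)
          (min stored.length incoming.length) (size + 1)
          (by simp) (by simp) hk (by rw [hsl]; exact hc)
        rw [hsl] at hhash
        rw [if_pos (hcondA.mpr hc), if_pos ⟨hhash, hc.symm⟩]
      · rw [if_neg (fun h => hc (hcondA.mp h)), if_neg (fun h => hc h.2.symm)]
        exact ih (by omega)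

theorem merge_lemma_main (stored incoming : List (List (String × String))) :
    merge_conversation_messages stored incoming = merge_conversation_messages_alt stored incoming := by
  unfold merge_conversation_messages merge_conversation_messages_alt
  by_cases hs : stored = []
  · simp [hs]
  · by_cases hr : incoming = []
    · simp [hs, hr]
    · simp only [hs, hr, if_false, or_self]
      rw [pvFind_eq stored incoming _ (le_refl _),
          PySem.List.slice_from_natCast]

-- ===== VERDICT (by name: the statement is the Claim_ definition above) =====
theorem merge_conversation_messages_spec : Claim_equal_merge_conversation_messages := by
  intro s r _
  unfold Spec_merge_conversation_messages
  exact merge_lemma_main s r
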